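-- pv_equiv track=rewrite | github.com/njuaplusplus/SketchAX | sketch-test/benchmarks/15_X/sygus_array_search_7/test_config.py | find
-- ===== SOURCE A (Python) =====
-- def find(l, k):
--     l_sorted = sorted(l)
--     for i in range(len(l)):
--         if l[i] != l_sorted[i]:
--             return 0
--     i = 0
--     for v in l:
--         if k < v: return i
--         i += 1
--     return i
-- ===== SOURCE B (Python) =====
-- def find(l, k):
--     # O(n): adjacent-pair sortedness check, then count elements <= k
--     if any(a > b for a, b in zip(l, l[1:])):
--         return 0
--     return sum(1 for v in l if v <= k)
-- ===== Notes on version B (the rewrite author's own statement) =====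
-- stated objective: faster
-- what changed: B replaces the sort-and-compare sortedness test with an O(n) adjacent-pair scan and replaces the early-exit position loop with a count of elements <= k (equal to the first index exceeding k on a sorted list).
import Mathlib
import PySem

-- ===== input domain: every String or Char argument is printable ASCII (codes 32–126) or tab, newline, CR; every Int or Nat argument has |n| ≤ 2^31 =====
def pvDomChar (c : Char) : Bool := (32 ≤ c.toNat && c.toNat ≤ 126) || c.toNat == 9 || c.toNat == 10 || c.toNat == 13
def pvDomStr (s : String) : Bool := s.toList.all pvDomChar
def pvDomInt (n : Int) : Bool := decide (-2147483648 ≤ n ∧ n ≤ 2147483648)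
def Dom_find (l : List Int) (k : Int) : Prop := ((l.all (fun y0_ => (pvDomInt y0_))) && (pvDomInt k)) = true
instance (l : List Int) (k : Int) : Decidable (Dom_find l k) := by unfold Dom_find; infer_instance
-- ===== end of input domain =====

-- B replaces the O(n log n) sort-and-compare sortedness test and the early-exit scan with an
-- O(n) adjacent-pair check plus a count of elements ≤ k.

-- ===== PORT A =====
-- for i in range(len(l)): if l[i] != l_sorted[i]: return 0   (l and sorted(l) have the same length)
def findChk : List Int → List Int → Bool
  | a :: as, b :: bs => if a ≠ b then false else findChk as bs
  | _, _ => true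

-- i = 0; for v in l: if k < v: return i; i += 1; return i
def findLoop : Int → List Int → Int → Int
  | _, [], i => i
  | k, v :: t, i => if k < v then i else findLoop k t (i + 1)

def find (l : List Int) (k : Int) : Int :=
  let l_sorted := PySem.List.sorted l (fun x => x) false
  if findChk l l_sorted then findLoop k l 0 else 0

-- ===== PORT B =====
def find_alt (l : List Int) (k : Int) : Int :=
  if (l.zip l.tail).any (fun p => p.1 > p.2) then 0
  else ((l.countP (fun v => v ≤ k) : Nat) : Int)

-- ===== PRECONDITION & SPEC =====
def Spec_find (l : List Int) (k : Int) (out : Int) : Prop := out = find_alt l k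
instance (l : List Int) (k : Int) (out : Int) : Decidable (Spec_find l k out) := by unfold Spec_find; infer_instance

-- ===== CLAIM (what is proved, stated in full; the proofs are below) =====
def Claim_equal_find : Prop := ∀ (l : List Int) (k : Int), Dom_find l k → Spec_find l k (find l k)

-- ===== LEMMAS AND PROOFS =====

theorem findChk_iff (l ls : List Int) (h : l.length = ls.length) :
    findChk l ls = true ↔ l = ls := by
  induction l generalizing ls with
  | nil => cases ls <;> simp [findChk] at h ⊢
  | cons a t ih =>
    cases ls with
    | nil => simp at h
    | cons b bs =>
      simp only [findChk]
      by_cases hab : a = b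
      · subst hab
        simp only [ne_eq, not_true_eq_false]
        simpa using ih bs (by simpa using h)
      · simp [hab]

theorem adj_any_iff (l : List Int) :
    (l.zip l.tail).any (fun p => p.1 > p.2) = false ↔ List.IsChain (· ≤ ·) l := by
  induction l with
  | nil => simp [List.IsChain.nil]
  | cons a t ih =>
    cases t with
    | nil => simp [List.IsChain.singleton]
    | cons b t' =>
      simp only [List.tail_cons, List.zip_cons_cons, List.any_cons, Bool.or_eq_false_iff] at ih ⊢
      rw [List.isChain_cons_cons]
      constructor
      · rintro ⟨h1, h2⟩
        exact ⟨by simpa using h1, ih.mp h2⟩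
      · rintro ⟨h1, h2⟩
        exact ⟨by simpa using h1, ih.mpr h2⟩

theorem findLoop_count (k : Int) (l : List Int) (hp : l.Pairwise (· ≤ ·)) (i : Int) :
    findLoop k l i = i + ((l.countP (fun v => v ≤ k) : Nat) : Int) := by
  induction l generalizing i with
  | nil => simp [findLoop]
  | cons v t ih =>
    rcases List.pairwise_cons.mp hp with ⟨hv, ht⟩
    by_cases hk : k < v
    · have hcnt : (v :: t).countP (fun x => decide (x ≤ k)) = 0 := by
        rw [List.countP_eq_zero]
        intro x hx
        rcases List.mem_cons.mp hx with rfl | hxt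
        · simpa using not_le.mpr hk
        · have : v ≤ x := hv x hxt
          simpa using not_le.mpr (lt_of_lt_of_le hk this)
      simp [findLoop, hk, hcnt]
    · have hvk : v ≤ k := not_lt.mp hk
      have := ih ht (i + 1)
      simp only [findLoop, if_neg hk, this, List.countP_cons, hvk]
      simp
      omega

theorem find_eq_alt (l : List Int) (k : Int) : find l k = find_alt l k := by
  by_cases h : List.IsChain (· ≤ ·) l
  · have hp : l.Pairwise (· ≤ ·) := List.isChain_iff_pairwise.mp h
    have hs : PySem.List.sorted l (fun x => x) false = l :=
      PySem.List.sorted_eq_self_of_pairwise l (fun x => x) (by simpa using hp)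
    have hchk : findChk l (PySem.List.sorted l (fun x => x) false) = true := by
      rw [findChk_iff _ _ (by rw [hs])]
      exact hs.symm
    have hany : (l.zip l.tail).any (fun p => p.1 > p.2) = false := (adj_any_iff l).mpr h
    simp only [find, find_alt, hchk, if_pos, hany, Bool.false_eq_true]
    simpa using findLoop_count k l hp 0
  · have hany : (l.zip l.tail).any (fun p => p.1 > p.2) = true := by
      rcases Bool.eq_false_or_eq_true ((l.zip l.tail).any (fun p => p.1 > p.2)) with ht | hf
      · exact ht
      · exact absurd ((adj_any_iff l).mp hf) h
    have hchk : findChk l (PySem.List.sorted l (fun x => x) false) = false := by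
      rcases Bool.eq_false_or_eq_true (findChk l (PySem.List.sorted l (fun x => x) false)) with ht | hf
      · exfalso
        have hlen : l.length = (PySem.List.sorted l (fun x => x) false).length :=
          ((PySem.List.sorted_perm l (fun x => x) false).length_eq).symm
        have heq := (findChk_iff _ _ hlen).mp ht
        have hp : (PySem.List.sorted l (fun x => x) false).Pairwise (· ≤ ·) := by
          simpa using PySem.List.sorted_pairwise l (fun x => x)
        rw [← heq] at hp
        exact h (List.isChain_iff_pairwise.mpr hp)
      · exact hf
    simp [find, find_alt, hchk, hany]

-- ===== VERDICT (by name: the statement is the Claim_ definition above) =====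
theorem find_spec : Claim_equal_find := by
  intro l k _
  exact find_eq_alt l k
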